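-- pv_equiv track=rewrite | github.com/Yankovsky/yandex-algos-training | hw6/f.py | time_to_copy
-- ===== SOURCE A (Python) =====
-- def time_to_copy(n, x, y):
--     left, right = 0, max(x, y) * n
--     while left < right:
--         t = (left + right) // 2
--         q_copies = t // min(x, y) + ((t - min(x, y)) // max(x, y))
--         if q_copies < n:
--             left = t + 1
--         else:
--             right = t
--     return left
-- ===== SOURCE B (Python) =====
-- def time_to_copy(n, x, y):
--     if n <= 0:
--         return 0
--     m, M = (x, y) if x <= y else (y, x)
--     k = n - 1
--     # first copy takes m; then the two machines need the least s with s//m + s//M >= k.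
--     # that least s is a multiple of m or of M; locate each by an analytic estimate plus
--     # a couple of corrective increments.
--     a = (k * M) // (M + m)
--     while a + (a * m) // M < k:
--         a += 1
--     b = (k * m) // (M + m)
--     while b + (b * M) // m < k:
--         b += 1
--     return m + min(a * m, b * M)
-- ===== Notes on version B (the rewrite author's own statement) =====
-- stated objective: faster
-- what changed: Replaces the binary search over [0, n*max] with O(1) arithmetic: the answer is min(x,y) plus the least s with s//m + s//M >= n-1, which is a multiple of m or of M; each candidate multiple is located by an analytic floor-division estimate followed by at most a couple of corrective increments.
-- outside the precondition, e.g. on time_to_copy(1, -2, 3): A returns 3, B returns -2; on time_to_copy(-1, -2, -3): A returns 2, B returns 0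
import Mathlib
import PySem

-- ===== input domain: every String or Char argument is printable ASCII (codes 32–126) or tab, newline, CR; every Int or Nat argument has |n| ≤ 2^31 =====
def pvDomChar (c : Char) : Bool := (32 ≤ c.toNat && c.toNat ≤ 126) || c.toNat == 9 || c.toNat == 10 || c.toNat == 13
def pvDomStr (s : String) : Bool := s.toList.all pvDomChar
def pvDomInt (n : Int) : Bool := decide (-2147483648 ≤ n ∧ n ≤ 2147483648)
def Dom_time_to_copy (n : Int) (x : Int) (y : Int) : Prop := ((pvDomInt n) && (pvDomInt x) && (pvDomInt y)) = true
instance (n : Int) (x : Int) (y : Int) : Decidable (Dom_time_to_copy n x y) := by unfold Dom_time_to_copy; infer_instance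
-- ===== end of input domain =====

-- B replaces A's binary search by O(1) closed-form floor arithmetic with a bounded corrective scan.

-- ===== PORT A =====
-- the while-loop of A; terminates because right - left shrinks
def timeLoop (n x y left right : Int) : Int :=
  if h : left < right then
    let t := PySem.Int.floordiv (left + right) 2
    if PySem.Int.floordiv t (min x y) + PySem.Int.floordiv (t - min x y) (max x y) < n then
      timeLoop n x y (t + 1) right
    else
      timeLoop n x y left t
  else
    left
termination_by (right - left).toNat
decreasing_by
  · have h1 : left ≤ PySem.Int.floordiv (left + right) 2 := by
      rw [PySem.Int.le_floordiv_iff_mul_le (by omega)]; omega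
    have h2 : PySem.Int.floordiv (left + right) 2 < right := by
      rw [PySem.Int.floordiv_lt_iff_lt_mul (by omega)]; omega
    omega
  · have h1 : left ≤ PySem.Int.floordiv (left + right) 2 := by
      rw [PySem.Int.le_floordiv_iff_mul_le (by omega)]; omega
    have h2 : PySem.Int.floordiv (left + right) 2 < right := by
      rw [PySem.Int.floordiv_lt_iff_lt_mul (by omega)]; omega
    omega

def time_to_copy (n : Int) (x : Int) (y : Int) : Int :=
  timeLoop n x y 0 (max x y * n)

-- ===== PORT B =====
-- B's first while loop; the '0 ≤ m ∧ 1 ≤ M' conjunct is a totality guard (always true on Pre_)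
def bumpA (k m M a : Int) : Int :=
  if h : a + PySem.Int.floordiv (a * m) M < k ∧ 0 ≤ m ∧ 1 ≤ M then
    bumpA k m M (a + 1)
  else
    a
termination_by (k - (a + PySem.Int.floordiv (a * m) M)).toNat
decreasing_by
  have hmono : PySem.Int.floordiv (a * m) M ≤ PySem.Int.floordiv ((a + 1) * m) M := by
    rw [PySem.Int.floordiv_eq_ediv_of_pos (by omega), PySem.Int.floordiv_eq_ediv_of_pos (by omega)]
    exact Int.ediv_le_ediv (by omega) (by nlinarith [h.2.1])
  omega

-- B's second while loop; '0 ≤ M ∧ 1 ≤ m' is the analogous totality guard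
def bumpB (k m M b : Int) : Int :=
  if h : b + PySem.Int.floordiv (b * M) m < k ∧ 0 ≤ M ∧ 1 ≤ m then
    bumpB k m M (b + 1)
  else
    b
termination_by (k - (b + PySem.Int.floordiv (b * M) m)).toNat
decreasing_by
  have hmono : PySem.Int.floordiv (b * M) m ≤ PySem.Int.floordiv ((b + 1) * M) m := by
    rw [PySem.Int.floordiv_eq_ediv_of_pos (by omega), PySem.Int.floordiv_eq_ediv_of_pos (by omega)]
    exact Int.ediv_le_ediv (by omega) (by nlinarith [h.2.1])
  omega

def time_to_copy_alt (n : Int) (x : Int) (y : Int) : Int :=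
  if n ≤ 0 then 0
  else
    let m := min x y
    let M := max x y
    let k := n - 1
    let a := bumpA k m M (PySem.Int.floordiv (k * M) (M + m))
    let b := bumpB k m M (PySem.Int.floordiv (k * m) (M + m))
    m + min (a * m) (b * M)

-- ===== PRECONDITION & SPEC =====
-- Pre_ restricts to the task's natural domain (nonnegative copy count, positive per-copy times),
-- plus the degenerate inputs n ≤ 0 ∧ 0 ≤ max x y on which A's window is empty and it returns 0;
-- excluded are inputs with a zero or negative rate where the loop body runs: there A divides by
-- zero (min = 0) or bisects a non-monotone count function, yielding an accidental value.
def Pre_time_to_copy (n : Int) (x : Int) (y : Int) : Prop :=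
  (0 ≤ n ∧ 1 ≤ min x y) ∨ (n ≤ 0 ∧ 0 ≤ max x y)
instance (n : Int) (x : Int) (y : Int) : Decidable (Pre_time_to_copy n x y) := by
  unfold Pre_time_to_copy; infer_instance

def pvWitness_time_to_copy : Int × Int × Int := (7, 2, 3)

def Spec_time_to_copy (n : Int) (x : Int) (y : Int) (out : Int) : Prop := out = time_to_copy_alt n x y
instance (n : Int) (x : Int) (y : Int) (out : Int) : Decidable (Spec_time_to_copy n x y out) := by unfold Spec_time_to_copy; infer_instance

-- ===== CLAIM (what is proved, stated in full; the proofs are below) =====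
def Claim_equal_time_to_copy : Prop := ∀ (n : Int) (x : Int) (y : Int), Dom_time_to_copy n x y → Pre_time_to_copy n x y → Spec_time_to_copy n x y (time_to_copy n x y)

-- ===== LEMMAS AND PROOFS =====

-- the copies-by-time-t count both programs reason about
def fCount (m M t : Int) : Int :=
  PySem.Int.floordiv t m + PySem.Int.floordiv (t - m) M

theorem fd_mono (a b c : Int) (hc : 1 ≤ c) (hab : a ≤ b) :
    PySem.Int.floordiv a c ≤ PySem.Int.floordiv b c := by
  rw [PySem.Int.floordiv_eq_ediv_of_pos (by omega), PySem.Int.floordiv_eq_ediv_of_pos (by omega)]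
  exact Int.ediv_le_ediv (by omega) hab

theorem fCount_mono (m M u v : Int) (hm : 1 ≤ m) (hM : 1 ≤ M) (huv : u ≤ v) :
    fCount m M u ≤ fCount m M v := by
  unfold fCount
  have h1 := fd_mono u v m hm huv
  have h2 := fd_mono (u - m) (v - m) M hM (by omega)
  omega

theorem fCount_lt_one (m M t : Int) (hm : 1 ≤ m) (hM : 1 ≤ M) (ht : t < m) :
    fCount m M t < 1 := by
  unfold fCount
  have h1 : PySem.Int.floordiv t m < 1 := by
    rw [PySem.Int.floordiv_lt_iff_lt_mul (by omega)]; omega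
  have h2 : PySem.Int.floordiv (t - m) M < 0 := by
    rw [PySem.Int.floordiv_lt_iff_lt_mul (by omega)]; omega
  omega

theorem fCount_top (m M n : Int) (hm : 1 ≤ m) (hmM : m ≤ M) (hn : 1 ≤ n) :
    n ≤ fCount m M (M * n) := by
  unfold fCount
  have h1 : n ≤ PySem.Int.floordiv (M * n) m := by
    rw [PySem.Int.le_floordiv_iff_mul_le (by omega)]; nlinarith
  have h2 : (0 : Int) ≤ PySem.Int.floordiv (M * n - m) M := by
    rw [PySem.Int.le_floordiv_iff_mul_le (by omega)]; nlinarith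
  omega

-- the binary search returns a time res with n ≤ fCount res and fCount < n strictly below res
theorem timeLoop_post (n x y : Int) (left right : Int)
    (hm : 1 ≤ min x y) (hlr : left ≤ right)
    (hlo : ∀ u, u < left → fCount (min x y) (max x y) u < n)
    (hhi : n ≤ fCount (min x y) (max x y) right) :
    n ≤ fCount (min x y) (max x y) (timeLoop n x y left right) ∧
      ∀ u, u < timeLoop n x y left right → fCount (min x y) (max x y) u < n := by
  induction left, right using timeLoop.induct n x y with
  | case1 left right h t hq ih =>
    have hM : (1:Int) ≤ max x y := le_trans hm (min_le_max)
    have h1 : left ≤ t := by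
      rw [show t = PySem.Int.floordiv (left + right) 2 from rfl,
          PySem.Int.le_floordiv_iff_mul_le (by omega)]; omega
    have h2 : t < right := by
      rw [show t = PySem.Int.floordiv (left + right) 2 from rfl,
          PySem.Int.floordiv_lt_iff_lt_mul (by omega)]; omega
    rw [timeLoop, dif_pos h, if_pos hq]
    have hqf : fCount (min x y) (max x y) t < n := hq
    refine ih (by omega) (fun u hu => ?_) hhi
    exact lt_of_le_of_lt (fCount_mono _ _ u t hm hM (by omega)) hqf
  | case2 left right h t hq ih =>
    have h1 : left ≤ t := by
      rw [show t = PySem.Int.floordiv (left + right) 2 from rfl,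
          PySem.Int.le_floordiv_iff_mul_le (by omega)]; omega
    have h2 : t < right := by
      rw [show t = PySem.Int.floordiv (left + right) 2 from rfl,
          PySem.Int.floordiv_lt_iff_lt_mul (by omega)]; omega
    rw [timeLoop, dif_pos h, if_neg hq]
    exact ih (by omega) hlo (not_lt.mp hq)
  | case3 left right h =>
    rw [timeLoop, dif_neg h]
    have heq : left = right := by omega
    exact ⟨heq ▸ hhi, hlo⟩

-- ψ a := a + (a·m)//M : the count at the candidate multiple a·m of m
theorem bumpA_post (k m M a0 : Int) (hm : 0 ≤ m) (hM : 1 ≤ M) :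
    a0 ≤ bumpA k m M a0 ∧
      k ≤ bumpA k m M a0 + PySem.Int.floordiv (bumpA k m M a0 * m) M ∧
      ∀ a, a0 ≤ a → a < bumpA k m M a0 → a + PySem.Int.floordiv (a * m) M < k := by
  induction a0 using bumpA.induct k m M with
  | case1 a h ih =>
    rw [bumpA, dif_pos h]
    refine ⟨by omega, ih.2.1, fun a' ha' ha'' => ?_⟩
    rcases lt_or_ge a' (a + 1) with hlt | hge
    · have : a' = a := by omega
      rw [this]; exact h.1
    · exact ih.2.2 a' hge ha''
  | case2 a h =>
    rw [bumpA, dif_neg h]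
    refine ⟨le_refl _, ?_, fun a' ha' ha'' => by omega⟩
    by_contra hc
    exact h ⟨by omega, hm, hM⟩

theorem bumpB_post (k m M b0 : Int) (hM : 0 ≤ M) (hm : 1 ≤ m) :
    b0 ≤ bumpB k m M b0 ∧
      k ≤ bumpB k m M b0 + PySem.Int.floordiv (bumpB k m M b0 * M) m ∧
      ∀ b, b0 ≤ b → b < bumpB k m M b0 → b + PySem.Int.floordiv (b * M) m < k := by
  induction b0 using bumpB.induct k m M with
  | case1 b h ih =>
    rw [bumpB, dif_pos h]
    refine ⟨by omega, ih.2.1, fun b' hb' hb'' => ?_⟩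
    rcases lt_or_ge b' (b + 1) with hlt | hge
    · have : b' = b := by omega
      rw [this]; exact h.1
    · exact ih.2.2 b' hge hb''
  | case2 b h =>
    rw [bumpB, dif_neg h]
    refine ⟨le_refl _, ?_, fun b' hb' hb'' => by omega⟩
    by_contra hc
    exact h ⟨by omega, hM, hm⟩

-- ψ is monotone, so the analytic start is a global lower bound on every a with ψ a ≥ k
theorem psi_lower (k m M a : Int) (hm : 1 ≤ m) (hM : 1 ≤ M)
    (hk : k ≤ a + PySem.Int.floordiv (a * m) M) :
    PySem.Int.floordiv (k * M) (M + m) ≤ a := by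
  have hq : PySem.Int.floordiv (a * m) M * M ≤ a * m := by
    rw [PySem.Int.floordiv_eq_ediv_of_pos (by omega)]
    exact Int.ediv_mul_le (a * m) (by omega)
  have hkM : k * M ≤ a * (M + m) := by nlinarith
  calc PySem.Int.floordiv (k * M) (M + m)
      ≤ PySem.Int.floordiv (a * (M + m)) (M + m) := by
        rw [PySem.Int.floordiv_eq_ediv_of_pos (by omega),
            PySem.Int.floordiv_eq_ediv_of_pos (by omega)]
        exact Int.ediv_le_ediv (by omega) hkM
    _ = a := by
        rw [PySem.Int.floordiv_eq_ediv_of_pos (by omega)]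
        exact Int.mul_ediv_cancel a (by omega)

-- B's result also satisfies the least-time characterisation
-- fCount (m + s) = 1 + s//m + s//M
theorem fCount_shift (m M s : Int) (hm : 1 ≤ m) :
    fCount m M (m + s) = 1 + PySem.Int.floordiv s m + PySem.Int.floordiv s M := by
  unfold fCount
  have h1 : PySem.Int.floordiv (m + s) m = PySem.Int.floordiv s m + 1 := by
    rw [PySem.Int.floordiv_eq_ediv_of_pos (by omega), PySem.Int.floordiv_eq_ediv_of_pos (by omega)]
    rw [show m + s = s + 1 * m by ring]
    exact Int.add_mul_ediv_right s 1 (by omega)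
  rw [h1, show m + s - m = s by ring]
  ring

theorem alt_post (n x y : Int) (hm : 1 ≤ min x y) (hn : 1 ≤ n) :
    n ≤ fCount (min x y) (max x y) (time_to_copy_alt n x y) ∧
      ∀ u, u < time_to_copy_alt n x y → fCount (min x y) (max x y) u < n := by
  set m := min x y with hmdef
  set M := max x y with hMdef
  have hM : (1:Int) ≤ M := le_trans hm min_le_max
  set k := n - 1 with hkdef
  set a0 := PySem.Int.floordiv (k * M) (M + m) with ha0
  set b0 := PySem.Int.floordiv (k * m) (M + m) with hb0
  have hA := bumpA_post k m M a0 (by omega) hM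
  have hB := bumpB_post k m M b0 (by omega) hm
  set A := bumpA k m M a0 with hA0
  set B := bumpB k m M b0 with hB0
  have halt : time_to_copy_alt n x y = m + min (A * m) (B * M) := by
    rw [time_to_copy_alt, if_neg (by omega)]
  -- global minimality of A and B among indices whose count reaches k
  have hAmin : ∀ a, k ≤ a + PySem.Int.floordiv (a * m) M → A ≤ a := by
    intro a ha
    by_contra hc
    have hlo : a0 ≤ a := psi_lower k m M a hm hM ha
    exact absurd ha (not_le.mpr (hA.2.2 a hlo (by omega)))
  have hBmin : ∀ b, k ≤ b + PySem.Int.floordiv (b * M) m → B ≤ b := by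
    intro b hb
    by_contra hc
    have hlo : b0 ≤ b := by
      have := psi_lower k M m b hM hm hb
      rwa [add_comm m M] at this
    exact absurd hb (not_le.mpr (hB.2.2 b hlo (by omega)))
  rw [halt]
  constructor
  · rw [fCount_shift m M _ hm]
    rcases min_cases (A * m) (B * M) with ⟨hmin, _⟩ | ⟨hmin, _⟩ <;> rw [hmin]
    · have h1 : PySem.Int.floordiv (A * m) m = A := by
        rw [PySem.Int.floordiv_eq_ediv_of_pos (by omega)]
        exact Int.mul_ediv_cancel A (by omega)
      have h2 := hA.2.1
      omega
    · have h1 : PySem.Int.floordiv (B * M) M = B := by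
        rw [PySem.Int.floordiv_eq_ediv_of_pos (by omega)]
        exact Int.mul_ediv_cancel B (by omega)
      have h2 := hB.2.1
      omega
  · intro u hu
    rcases (by omega : u < m ∨ m ≤ u) with hum | hum
    · exact lt_of_lt_of_le (fCount_lt_one m M u hm hM hum) (by omega)
    · have hs' : u = m + (u - m) := by ring
      rw [hs', fCount_shift m M _ hm]
      set s' := u - m with hs'def
      have hsA : s' < A * m := by
        have := le_min_iff.mp (le_refl (min (A * m) (B * M)))
        omega
      have hsB : s' < B * M := by
        have := le_min_iff.mp (le_refl (min (A * m) (B * M)))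
        omega
      set A' := PySem.Int.floordiv s' m with hA'
      set B' := PySem.Int.floordiv s' M with hB'
      have hA'lt : A' < A := by
        rw [hA', PySem.Int.floordiv_lt_iff_lt_mul (by omega)]; exact hsA
      have hB'lt : B' < B := by
        rw [hB', PySem.Int.floordiv_lt_iff_lt_mul (by omega)]; exact hsB
      by_contra hcon
      have hsum : k ≤ A' + B' := by omega
      have hpsiA' : A' + PySem.Int.floordiv (A' * m) M < k :=
        not_le.mp (fun hk => absurd (hAmin A' hk) (not_le.mpr hA'lt))
      have hphiB' : B' + PySem.Int.floordiv (B' * M) m < k :=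
        not_le.mp (fun hk => absurd (hBmin B' hk) (not_le.mpr hB'lt))
      have h1 : A' * m < B' * M := by
        have : PySem.Int.floordiv (A' * m) M < B' := by omega
        rwa [PySem.Int.floordiv_lt_iff_lt_mul (by omega)] at this
      have h2 : B' * M < A' * m := by
        have : PySem.Int.floordiv (B' * M) m < A' := by omega
        rwa [PySem.Int.floordiv_lt_iff_lt_mul (by omega)] at this
      omega

theorem least_unique (m M n r1 r2 : Int)
    (h1 : n ≤ fCount m M r1 ∧ ∀ u, u < r1 → fCount m M u < n)
    (h2 : n ≤ fCount m M r2 ∧ ∀ u, u < r2 → fCount m M u < n) : r1 = r2 := by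
  rcases lt_trichotomy r1 r2 with h | h | h
  · exact absurd h1.1 (not_le.mpr (h2.2 r1 h))
  · exact h
  · exact absurd h2.1 (not_le.mpr (h1.2 r2 h))

-- ===== VERDICT (by name: the statement is the Claim_ definition above) =====
theorem time_to_copy_spec : Claim_equal_time_to_copy := by
  intro n x y _ hpre
  unfold Spec_time_to_copy
  rcases (by omega : n ≤ 0 ∨ 1 ≤ n) with hn0 | hn0
  · -- degenerate: A's window is empty, B short-circuits
    have hmax : 0 ≤ max x y := by
      rcases hpre with ⟨hn, hmin⟩ | ⟨_, hmax⟩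
      · exact le_trans (by omega) (le_trans hmin min_le_max)
      · exact hmax
    have hr : max x y * n ≤ 0 := mul_nonpos_of_nonneg_of_nonpos hmax hn0
    unfold time_to_copy
    rw [timeLoop, dif_neg (by omega), time_to_copy_alt, if_pos hn0]
  · have hm : 1 ≤ min x y := by
      rcases hpre with ⟨_, hmin⟩ | ⟨hn, _⟩
      · exact hmin
      · omega
    have hM : (1:Int) ≤ max x y := le_trans hm min_le_max
    have hA := timeLoop_post n x y 0 (max x y * n) hm
      (by nlinarith)
      (fun u hu => lt_of_lt_of_le (fCount_lt_one _ _ _ hm hM (by omega)) hn0)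
      (fCount_top _ _ _ hm min_le_max hn0)
    have hB := alt_post n x y hm hn0
    exact least_unique _ _ n _ _ hA hB
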